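-- pv_equiv track=rewrite | github.com/kraxx/google-code-jam-2018 | prelims/hackrobot.py | calcDamage
-- ===== SOURCE A (Python) =====
-- def calcDamage(program):
-- 	dmg = 0
-- 	atk = 1
-- 	for cmd in program:
-- 		if cmd == 'S':
-- 			dmg += atk
-- 		else:
-- 			atk *= 2
-- 	return dmg
-- ===== SOURCE B (Python) =====
-- def calcDamage(program):
--     total = 0
--     for cmd in reversed(program):
--         if cmd == 'S':
--             total += 1
--         else:
--             total *= 2
--     return total
-- ===== Notes on version B (the rewrite author's own statement) =====
-- stated objective: alternative
-- what changed: B scans the program in reverse maintaining the damage-so-far (add 1 per 'S', double per charge), instead of A's forward pass with a separate attack multiplier.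
import Mathlib
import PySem

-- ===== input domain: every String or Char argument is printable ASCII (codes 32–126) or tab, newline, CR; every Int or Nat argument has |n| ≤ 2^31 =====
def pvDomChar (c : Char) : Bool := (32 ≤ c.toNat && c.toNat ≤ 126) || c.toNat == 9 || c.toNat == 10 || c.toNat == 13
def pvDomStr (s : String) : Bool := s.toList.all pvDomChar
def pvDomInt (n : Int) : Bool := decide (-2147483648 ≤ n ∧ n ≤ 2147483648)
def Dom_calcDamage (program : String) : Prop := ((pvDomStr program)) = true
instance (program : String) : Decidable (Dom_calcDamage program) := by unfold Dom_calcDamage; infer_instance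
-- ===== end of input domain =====

-- B traverses the program in reverse keeping one running damage total (add 1 on 'S', double on charge); same O(n) cost, different decomposition.

-- ===== PORT A =====
-- forward pass: state (dmg, atk); 'S' adds atk to dmg, anything else doubles atk
def calcDamage (program : String) : Int :=
  (program.toList.foldl
    (fun st cmd => if cmd = 'S' then (st.1 + st.2, st.2) else (st.1, st.2 * 2))
    ((0 : Int), (1 : Int))).1

-- ===== PORT B =====
-- reverse pass: single running total; 'S' adds 1, anything else doubles the total
def calcDamage_alt (program : String) : Int :=
  program.toList.reverse.foldl
    (fun total cmd => if cmd = 'S' then total + 1 else total * 2)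
    (0 : Int)

-- ===== PRECONDITION & SPEC =====
def Spec_calcDamage (program : String) (out : Int) : Prop := out = calcDamage_alt program
instance (program : String) (out : Int) : Decidable (Spec_calcDamage program out) := by unfold Spec_calcDamage; infer_instance

-- ===== CLAIM (what is proved, stated in full; the proofs are below) =====
def Claim_equal_calcDamage : Prop := ∀ (program : String), Dom_calcDamage program → Spec_calcDamage program (calcDamage program)

-- ===== LEMMAS AND PROOFS =====

theorem calc_fold_eq (l : List Char) (dmg atk : Int) :
    (l.foldl (fun st cmd => if cmd = 'S' then (st.1 + st.2, st.2) else (st.1, st.2 * 2))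
      (dmg, atk)).1
    = dmg + atk * l.foldr (fun cmd t => if cmd = 'S' then t + 1 else t * 2) 0 := by
  induction l generalizing dmg atk with
  | nil => simp
  | cons c l ih =>
    simp only [List.foldl_cons, List.foldr_cons]
    by_cases h : c = 'S' <;> simp [h, ih] <;> ring

-- ===== VERDICT (by name: the statement is the Claim_ definition above) =====
theorem calcDamage_spec : Claim_equal_calcDamage := by
  intro program _
  unfold Spec_calcDamage calcDamage calcDamage_alt
  rw [List.foldl_reverse, calc_fold_eq]
  ring
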